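-- pv_equiv track=rewrite | github.com/HorseSF/xf_Python | day12/code/00-函数习题讲解.py | get_max2
-- ===== SOURCE A (Python) =====
-- def get_max2(seq):
--     if type(seq) == dict:
--         seq = list(seq.values())
--     x = seq[0]
--     for i in seq:
--         if x < i:
--             x = i
--     return x
-- ===== SOURCE B (Python) =====
-- def get_max2(seq):
--     if type(seq) == dict:
--         seq = list(seq.values())
--     s = sorted(seq)
--     return s[-1]
-- ===== Notes on version B (the rewrite author's own statement) =====
-- stated objective: alternative
-- what changed: B sorts the sequence and returns its last element instead of A's linear comparison scan with an accumulator.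
import Mathlib
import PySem

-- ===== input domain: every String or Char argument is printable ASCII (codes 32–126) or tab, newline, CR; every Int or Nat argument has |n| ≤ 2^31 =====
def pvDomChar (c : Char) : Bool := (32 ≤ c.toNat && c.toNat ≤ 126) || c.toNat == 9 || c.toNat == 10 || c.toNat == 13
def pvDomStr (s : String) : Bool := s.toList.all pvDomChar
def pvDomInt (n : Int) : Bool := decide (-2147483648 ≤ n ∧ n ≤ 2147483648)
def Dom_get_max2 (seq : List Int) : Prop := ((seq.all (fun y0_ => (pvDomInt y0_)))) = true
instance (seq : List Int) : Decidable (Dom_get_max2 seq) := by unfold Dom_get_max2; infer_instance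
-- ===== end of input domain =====

-- B replaces A's linear accumulator scan by sorting and taking the last element (alternative strategy, not faster).

-- ===== PORT A =====
def get_max2 (seq : List Int) : Int :=
  -- x = seq[0] (IndexError on [] is excluded by Pre_); then the for-loop as a foldl
  match PySem.List.pyGet? seq 0 with
  | none => 0
  | some x0 => seq.foldl (fun x i => if x < i then i else x) x0

-- ===== PORT B =====
def get_max2_alt (seq : List Int) : Int :=
  let s := PySem.List.sorted seq (fun x => x) false
  -- s[-1] (IndexError on [] is excluded by Pre_)
  match PySem.List.pyGet? s (-1) with
  | none => 0
  | some v => v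

-- ===== PRECONDITION & SPEC =====
-- Pre_ excludes the empty list, on which both Pythons raise IndexError.
def Pre_get_max2 (seq : List Int) : Prop := seq ≠ []
instance (seq : List Int) : Decidable (Pre_get_max2 seq) := by unfold Pre_get_max2; infer_instance
def pvWitness_get_max2 : List Int := [3, 1, 4]
def Spec_get_max2 (seq : List Int) (out : Int) : Prop := out = get_max2_alt seq
instance (seq : List Int) (out : Int) : Decidable (Spec_get_max2 seq out) := by unfold Spec_get_max2; infer_instance

-- ===== CLAIM (what is proved, stated in full; the proofs are below) =====
def Claim_equal_get_max2 : Prop := ∀ (seq : List Int), Dom_get_max2 seq → Pre_get_max2 seq → Spec_get_max2 seq (get_max2 seq)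

-- ===== LEMMAS AND PROOFS =====

theorem pv_fold_step (x i : Int) : (if x < i then i else x) = max x i := by
  split_ifs with h <;> omega

theorem pv_fold_ge (l : List Int) (a : Int) :
    a ≤ l.foldl max a ∧ ∀ y ∈ l, y ≤ l.foldl max a := by
  induction l generalizing a with
  | nil => simp
  | cons hd t ih =>
    have := ih (max a hd)
    refine ⟨le_trans (le_max_left a hd) this.1, ?_⟩
    intro y hy
    rcases List.mem_cons.mp hy with rfl | h2
    · exact le_trans (le_max_right a y) this.1
    · exact this.2 y h2

theorem pv_fold_mem (l : List Int) (a : Int) :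
    l.foldl max a = a ∨ l.foldl max a ∈ l := by
  induction l generalizing a with
  | nil => simp
  | cons h t ih =>
    rcases ih (max a h) with h1 | h2
    · rcases max_cases a h with ⟨he, _⟩ | ⟨he, _⟩
      · left; simpa [List.foldl, he] using h1
      · right; rw [List.foldl, h1, he]; exact List.mem_cons_self
    · right; exact List.mem_cons_of_mem _ h2

theorem pv_pairwise_le_getLast (l : List Int) (hne : l ≠ []) (hp : l.Pairwise (fun a b => a ≤ b)) :
    ∀ y ∈ l, y ≤ l.getLast hne := by
  induction l with
  | nil => simp at hne
  | cons a t ih =>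
    intro y hy
    rcases List.mem_cons.mp hy with rfl | hyt
    · cases t with
      | nil => simp [List.getLast]
      | cons b u =>
        rw [List.getLast_cons (by simp)]
        exact (List.pairwise_cons.mp hp).1 _ (List.getLast_mem (by simp))
    · cases t with
      | nil => simp at hyt
      | cons b u =>
        rw [List.getLast_cons (by simp)]
        exact ih (by simp) (List.pairwise_cons.mp hp).2 y hyt

theorem get_max2_spec_aux (seq : List Int) (h : seq ≠ []) :
    get_max2 seq = get_max2_alt seq := by
  obtain ⟨x0, t, rfl⟩ := List.exists_cons_of_ne_nil h
  set seq := x0 :: t with hseq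
  have hA : get_max2 seq = seq.foldl max x0 := by
    simp only [get_max2, hseq, PySem.List.pyGet?_zero_cons]
    congr 1
    funext x i
    exact pv_fold_step x i
  set s := PySem.List.sorted seq (fun x => x) false with hs
  have hsne : s ≠ [] := by
    intro hnil
    rw [hs, PySem.List.sorted_eq_nil_iff] at hnil
    exact h hnil
  have hlast : s.getLast? = some (s.getLast hsne) := List.getLast?_eq_some_getLast hsne
  have hB : get_max2_alt seq = s.getLast hsne := by
    simp only [get_max2_alt, ← hs, PySem.List.pyGet?_neg_one, hlast]
  set m := s.getLast hsne with hm
  have hperm : s.Perm seq := PySem.List.sorted_perm seq (fun x => x) false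
  -- every element of s is ≤ the last element of s
  have hpw : s.Pairwise (fun a b => a ≤ b) := by
    rw [hs]; exact PySem.List.sorted_pairwise seq (fun x => x)
  have hmono : ∀ y ∈ s, y ≤ m := pv_pairwise_le_getLast s hsne hpw
  have hmem_m : m ∈ seq := hperm.mem_iff.mp (List.getLast_mem hsne)
  have hfold := pv_fold_ge seq x0
  have hfold_mem : seq.foldl max x0 = x0 ∨ seq.foldl max x0 ∈ seq := pv_fold_mem seq x0
  have hfold_in : seq.foldl max x0 ∈ seq := by
    rcases hfold_mem with h1 | h2
    · rw [h1, hseq]; exact List.mem_cons_self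
    · exact h2
  have h1 : seq.foldl max x0 ≤ m := hmono _ (hperm.mem_iff.mpr hfold_in)
  have h2 : m ≤ seq.foldl max x0 := hfold.2 m hmem_m
  rw [hA, hB]
  omega

-- ===== VERDICT (by name: the statement is the Claim_ definition above) =====
theorem get_max2_spec : Claim_equal_get_max2 := by
  intro seq _ hpre
  unfold Spec_get_max2
  exact get_max2_spec_aux seq hpre
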